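-- pv_equiv track=rewrite | github.com/lamanabin2046/kalimati-mlops | Tomato_price_prediction/src/ingestion/news_event_ingestion.py | infer_severity
-- ===== SOURCE A (Python) =====
-- def infer_severity(text: str) -> int:
--     """
--     Simple rule-based severity:
--     1 minor
--     2 moderate
--     3 severe
--     4 major
--     5 extreme
--     """
--     if not text:
--         return 1
--
--     txt = text.lower()
--     score = 1
--
--     moderate_terms = [
--         "road blocked",
--         "road obstruction",
--         "one-way traffic",
--         "flooding",
--         "landslide",
--         "flood",
--         "heavy rain",
--         "continuous rainfall",
--         "damaged road",
--     ]
--     severe_terms = [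
--         "major",
--         "severe",
--         "widespread",
--         "highway blocked",
--         "highway obstructed",
--         "power supply disrupted",
--         "transport disrupted",
--         "multiple places",
--         "several places",
--         "district affected",
--     ]
--
--     for term in moderate_terms:
--         if term in txt:
--             score = max(score, 2)
--
--     for term in severe_terms:
--         if term in txt:
--             score = max(score, 3)
--
--     if "death toll" in txt or "killed" in txt or "fatal" in txt:
--         score = max(score, 4)
--
--     if "nationwide" in txt or "extreme" in txt:
--         score = max(score, 5)
--
--     return score
-- ===== SOURCE B (Python) =====
-- def infer_severity(text: str) -> int:
--     # Simpler: one descending table scan with early return instead of four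
--     # accumulate-with-max passes.
--     if not text:
--         return 1
--     txt = text.lower()
--     tiers = [
--         (5, ["nationwide", "extreme"]),
--         (4, ["death toll", "killed", "fatal"]),
--         (3, [
--             "major",
--             "severe",
--             "widespread",
--             "highway blocked",
--             "highway obstructed",
--             "power supply disrupted",
--             "transport disrupted",
--             "multiple places",
--             "several places",
--             "district affected",
--         ]),
--         (2, [
--             "road blocked",
--             "road obstruction",
--             "one-way traffic",
--             "flooding",
--             "landslide",
--             "flood",
--             "heavy rain",
--             "continuous rainfall",
--             "damaged road",
--         ]),
--     ]
--     for value, terms in tiers: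
--         if any(t in txt for t in terms):
--             return value
--     return 1
-- ===== Notes on version B (the rewrite author's own statement) =====
-- stated objective: simpler
-- what changed: Replaces A's four sequential accumulate-with-max scans by a single descending table of tiers scanned highest-first with early return on the first matching tier.
import Mathlib
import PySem

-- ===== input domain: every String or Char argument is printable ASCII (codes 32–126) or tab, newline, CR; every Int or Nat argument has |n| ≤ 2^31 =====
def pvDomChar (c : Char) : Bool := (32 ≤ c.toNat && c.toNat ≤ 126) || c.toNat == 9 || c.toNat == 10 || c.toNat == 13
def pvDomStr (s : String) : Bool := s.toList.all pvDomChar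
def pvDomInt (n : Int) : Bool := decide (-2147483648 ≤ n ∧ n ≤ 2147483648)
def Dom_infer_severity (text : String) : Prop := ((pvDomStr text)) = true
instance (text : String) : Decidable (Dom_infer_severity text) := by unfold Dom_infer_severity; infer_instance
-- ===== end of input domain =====

-- One honest line: B replaces A's four accumulate-with-max scans by a single
-- descending tier table scanned highest-first with early return (simpler control flow).


-- ===== PORT A =====
def infer_severity (text : String) : Int :=
  if text = "" then 1
  else
    let txt := PySem.Str.lower text
    let moderate_terms : List String :=
      ["road blocked", "road obstruction", "one-way traffic", "flooding",
       "landslide", "flood", "heavy rain", "continuous rainfall", "damaged road"]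
    let severe_terms : List String :=
      ["major", "severe", "widespread", "highway blocked", "highway obstructed",
       "power supply disrupted", "transport disrupted", "multiple places",
       "several places", "district affected"]
    let score : Int := 1
    let score := moderate_terms.foldl
      (fun sc term => if PySem.Str.isIn term txt then max sc 2 else sc) score
    let score := severe_terms.foldl
      (fun sc term => if PySem.Str.isIn term txt then max sc 3 else sc) score
    let score := if PySem.Str.isIn "death toll" txt || PySem.Str.isIn "killed" txt
                    || PySem.Str.isIn "fatal" txt then max score 4 else score
    let score := if PySem.Str.isIn "nationwide" txt || PySem.Str.isIn "extreme" txt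
                    then max score 5 else score
    score

-- ===== PORT B =====
def inferSeverityTiers : List (Int × List String) :=
  [(5, ["nationwide", "extreme"]),
   (4, ["death toll", "killed", "fatal"]),
   (3, ["major", "severe", "widespread", "highway blocked", "highway obstructed",
        "power supply disrupted", "transport disrupted", "multiple places",
        "several places", "district affected"]),
   (2, ["road blocked", "road obstruction", "one-way traffic", "flooding",
        "landslide", "flood", "heavy rain", "continuous rainfall", "damaged road"])]

-- the early-return loop over the tier table
def inferSeverityScan (txt : String) : List (Int × List String) → Int
  | [] => 1
  | (value, terms) :: rest =>
      if terms.any (fun t => PySem.Str.isIn t txt) then value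
      else inferSeverityScan txt rest

def infer_severity_alt (text : String) : Int :=
  if text = "" then 1
  else inferSeverityScan (PySem.Str.lower text) inferSeverityTiers

-- ===== PRECONDITION & SPEC =====
def Spec_infer_severity (text : String) (out : Int) : Prop := out = infer_severity_alt text
instance (text : String) (out : Int) : Decidable (Spec_infer_severity text out) := by unfold Spec_infer_severity; infer_instance

-- ===== CLAIM (what is proved, stated in full; the proofs are below) =====
def Claim_equal_infer_severity : Prop := ∀ (text : String), Dom_infer_severity text → Spec_infer_severity text (infer_severity text)

-- ===== LEMMAS AND PROOFS =====

-- A's accumulate-with-max scan over a term list equals an 'any' test.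
theorem foldl_max_any (txt : String) (k : Int) (ts : List String) (s : Int) :
    ts.foldl (fun sc term => if PySem.Str.isIn term txt then max sc k else sc) s
      = if ts.any (fun t => PySem.Str.isIn t txt) then max s k else s := by
  induction ts generalizing s with
  | nil => simp
  | cons h t ih =>
      rw [List.foldl_cons]
      by_cases hh : PySem.Str.isIn h txt = true
      · rw [if_pos hh, ih, List.any_cons, hh, Bool.true_or, if_pos rfl]
        by_cases hta : (t.any fun t => PySem.Str.isIn t txt) = true
        · rw [if_pos hta, max_assoc, max_self]
        · rw [if_neg hta]
      · rw [if_neg hh, ih]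
        have hh' : PySem.Str.isIn h txt = false := by
          cases hv : PySem.Str.isIn h txt
          · rfl
          · exact absurd hv hh
        rw [List.any_cons, hh', Bool.false_or]

-- the abstract shape of both programs over the four tier conditions
theorem core_shape (m s d n : Bool) :
    (if n then max (if d then max (if s then max (if m then max (1 : Int) 2 else 1) 3
                                    else (if m then max (1 : Int) 2 else 1)) 4
                         else (if s then max (if m then max (1 : Int) 2 else 1) 3
                                    else (if m then max (1 : Int) 2 else 1))) 5
          else (if d then max (if s then max (if m then max (1 : Int) 2 else 1) 3
                                    else (if m then max (1 : Int) 2 else 1)) 4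
                     else (if s then max (if m then max (1 : Int) 2 else 1) 3
                                else (if m then max (1 : Int) 2 else 1))))
      = (if n then 5 else if d then 4 else if s then 3 else if m then 2 else (1 : Int)) := by
  cases m <;> cases s <;> cases d <;> cases n <;> decide

-- ===== VERDICT (by name: the statement is the Claim_ definition above) =====
theorem infer_severity_spec : Claim_equal_infer_severity := by
  intro text _
  unfold Spec_infer_severity
  by_cases h0 : text = ""
  · simp [infer_severity, infer_severity_alt, h0]
  · simp only [infer_severity, infer_severity_alt, if_neg h0, inferSeverityTiers,
      inferSeverityScan, foldl_max_any, List.any_cons, List.any_nil,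
      Bool.or_false, Bool.or_assoc]
    exact core_shape _ _ _ _
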